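-- pv_equiv track=rewrite | github.com/wzlxjtu/PDF2LaTeX-dataset | evaluate.py | splitMathFromText
-- ===== SOURCE A (Python) =====
-- def splitMathFromText(text):
--     # given a string of text, separate the math from text
--     # return a list of sentences
--     separator = []
--     sentences = []
--     for i in range(len(text)):
--         if text[i] == '$':
--             separator.append(i)
--     assert(len(separator) % 2 == 0)
--     idx = 0
--     for i in range(int(len(separator)/2)):
--         sentences.append(text[idx:separator[i*2]])
--         sentences.append(text[separator[i*2]:separator[i*2+1]+1])
--         idx = separator[i*2+1]+1
--     sentences.append(text[idx:-1])
--
--     return sentences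
-- ===== SOURCE B (Python) =====
-- def splitMathFromText(text):
--     # single pass: state machine over characters instead of collecting '$' positions and slicing
--     assert text.count('$') % 2 == 0
--     sentences = []
--     cur = ''
--     in_math = False
--     for ch in text:
--         if ch == '$':
--             if in_math:
--                 sentences.append(cur + '$')
--                 cur = ''
--             else:
--                 sentences.append(cur)
--                 cur = '$'
--             in_math = not in_math
--         else:
--             cur += ch
--     sentences.append(cur[:-1])
--     return sentences
-- ===== Notes on version B (the rewrite author's own statement) =====
-- stated objective: alternative
-- what changed: B replaces A's two-phase algorithm (collect all '$' positions, then reconstruct segments by index slicing over position pairs) with a single left-to-right state-machine pass that builds each segment incrementally, keeping both the even-'$' assert and the final-segment last-character drop.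
-- outside the precondition, e.g. on splitMathFromText('$'): A raises AssertionError, B raises AssertionError
import Mathlib
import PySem

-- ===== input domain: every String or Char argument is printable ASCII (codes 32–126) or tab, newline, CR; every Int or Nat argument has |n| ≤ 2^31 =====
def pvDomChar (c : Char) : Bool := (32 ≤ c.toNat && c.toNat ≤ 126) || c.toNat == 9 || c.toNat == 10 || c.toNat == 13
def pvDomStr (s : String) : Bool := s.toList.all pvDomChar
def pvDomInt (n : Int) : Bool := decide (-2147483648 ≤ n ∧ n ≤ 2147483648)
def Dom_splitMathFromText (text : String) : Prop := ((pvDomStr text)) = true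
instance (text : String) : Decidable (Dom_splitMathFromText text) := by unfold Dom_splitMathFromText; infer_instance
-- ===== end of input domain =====

-- B replaces A's '$'-position collection + index slicing with a single left-to-right
-- state-machine pass over the characters (objective: alternative, same cost).

-- ===== PORT A =====
-- A-side helpers: the bodies of A's two loops, over the character list of `text`
def sepBody (s : List Char) (sep : List Int) (i : Int) : List Int :=
  if PySem.List.pyGetD s i ' ' = '$' then sep ++ [i] else sep

def pairBody (s : List Char) (separator : List Int)
    (st : List (List Char) × Int) (i : Int) : List (List Char) × Int :=
  (st.1 ++ [PySem.List.slice s (some st.2) (some (PySem.List.pyGetD separator (i * 2) 0)),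
            PySem.List.slice s (some (PySem.List.pyGetD separator (i * 2) 0))
                               (some (PySem.List.pyGetD separator (i * 2 + 1) 0 + 1))],
   PySem.List.pyGetD separator (i * 2 + 1) 0 + 1)

def splitMathFromText (text : String) : List String :=
  let s := text.toList
  let separator : List Int := (PySem.List.pyRange 0 (PySem.Str.len text)).foldl (sepBody s) []
  let n : Int := PySem.Int.floordiv ((separator.length : Int)) 2
  let res := (PySem.List.pyRange 0 n).foldl (pairBody s separator) ([], 0)
  (res.1 ++ [PySem.List.slice s (some res.2) (some (-1))]).map String.ofList

-- ===== PORT B =====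
-- single pass: state machine over characters (sentences so far, current segment, in-math flag)
def altGo (sentences : List (List Char)) (cur : List Char) (inMath : Bool) :
    List Char → List (List Char)
  | [] => sentences ++ [cur.dropLast]
  | c :: rest =>
    if c = '$' then
      if inMath then altGo (sentences ++ [cur ++ ['$']]) [] false rest
      else altGo (sentences ++ [cur]) ['$'] true rest
    else altGo sentences (cur ++ [c]) inMath rest

def splitMathFromText_alt (text : String) : List String :=
  (altGo [] [] false text.toList).map String.ofList

-- ===== PRECONDITION & SPEC =====
-- Pre_: an odd number of '$' makes both A's and B's assert fail (AssertionError)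
def Pre_splitMathFromText (text : String) : Prop := text.toList.count '$' % 2 = 0
instance (text : String) : Decidable (Pre_splitMathFromText text) := by
  unfold Pre_splitMathFromText; infer_instance

def pvWitness_splitMathFromText : String := "ab $x+y$ cd"

def Spec_splitMathFromText (text : String) (out : List String) : Prop := out = splitMathFromText_alt text
instance (text : String) (out : List String) : Decidable (Spec_splitMathFromText text out) := by unfold Spec_splitMathFromText; infer_instance

-- ===== CLAIM (what is proved, stated in full; the proofs are below) =====
def Claim_equal_splitMathFromText : Prop := ∀ (text : String), Dom_splitMathFromText text → Pre_splitMathFromText text → Spec_splitMathFromText text (splitMathFromText text)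

-- ===== LEMMAS AND PROOFS =====

-- the list of indices of '$' in t, offset by `off` (what A's first loop collects)
def sepNat : List Char → Nat → List Nat
  | [], _ => []
  | c :: cs, k => if c = '$' then k :: sepNat cs (k + 1) else sepNat cs (k + 1)

-- A's second loop as structural recursion on consecutive pairs of indices
def pairN (s : List Char) : List Nat → List (List Char) → Nat → List (List Char) × Nat
  | a :: b :: rest, acc, idx =>
    pairN s rest (acc ++ [(s.drop idx).take (a - idx), (s.drop a).take (b + 1 - a)]) (b + 1)
  | _, acc, idx => (acc, idx)

lemma sepNat_of_nodollar : ∀ (t : List Char), '$' ∉ t → ∀ off, sepNat t off = [] := by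
  intro t
  induction t with
  | nil => intro _ off; rfl
  | cons c cs ih =>
    intro h off
    simp only [List.mem_cons, not_or] at h
    simp [sepNat, Ne.symm h.1, ih h.2]


lemma sepNat_append : ∀ (pre t : List Char), '$' ∉ pre → ∀ off,
    sepNat (pre ++ t) off = sepNat t (off + pre.length) := by
  intro pre
  induction pre with
  | nil => intro t _ off; simp
  | cons c cs ih =>
    intro t h off
    simp only [List.mem_cons, not_or] at h
    have : c ≠ '$' := fun hc => h.1 hc.symm
    simp only [List.cons_append, sepNat, if_neg this, ih t h.2 (off + 1), List.length_cons]
    congr 1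
    omega


lemma sepNat_shift : ∀ (t : List Char) (off d : Nat),
    sepNat t (off + d) = (sepNat t off).map (· + d) := by
  intro t
  induction t with
  | nil => intro off d; rfl
  | cons c cs ih =>
    intro off d
    by_cases hc : c = '$'
    · simp only [sepNat, if_pos hc, List.map_cons]
      have : off + d + 1 = (off + 1) + d := by omega
      rw [this, ih (off + 1) d]
    · simp only [sepNat, if_neg hc]
      have : off + d + 1 = (off + 1) + d := by omega
      rw [this, ih (off + 1) d]


lemma sep_fold_gen : ∀ (t : List Char) (off : Nat) (init : List Int),
    List.foldl (fun sep (k : Nat) =>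
        if t.getD k ' ' = '$' then sep ++ [((k + off : Nat) : Int)] else sep)
      init (List.range t.length)
    = init ++ (sepNat t off).map (fun (j : Nat) => (j : Int)) := by
  intro t
  induction t with
  | nil => intro off init; simp [sepNat]
  | cons c cs ih =>
    intro off init
    rw [List.length_cons, List.range_succ_eq_map, List.foldl_cons, List.foldl_map]
    have hbody : (fun (sep : List Int) (k : Nat) =>
        if (c :: cs).getD k.succ ' ' = '$' then sep ++ [((k.succ + off : Nat) : Int)] else sep)
        = (fun sep k =>
        if cs.getD k ' ' = '$' then sep ++ [((k + (off + 1) : Nat) : Int)] else sep) := by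
      funext sep k
      have h1 : (c :: cs).getD k.succ ' ' = cs.getD k ' ' := rfl
      have h2 : k.succ + off = k + (off + 1) := by omega
      rw [h1, h2]
    rw [hbody, ih (off + 1)]
    simp only [List.getD_cons_zero, Nat.zero_add, sepNat]
    by_cases hc : c = '$'
    · rw [if_pos hc, if_pos hc]
      simp
    · rw [if_neg hc, if_neg hc]

lemma pairN_acc (s : List Char) : ∀ (idxs : List Nat) (acc : List (List Char)) (i : Nat),
    pairN s idxs acc i = (acc ++ (pairN s idxs [] i).1, (pairN s idxs [] i).2) := by
  intro idxs
  have key : ∀ (n : Nat) (idxs : List Nat), idxs.length ≤ n → ∀ acc i,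
      pairN s idxs acc i = (acc ++ (pairN s idxs [] i).1, (pairN s idxs [] i).2) := by
    intro n
    induction n with
    | zero =>
      intro idxs hlen acc i
      rw [List.length_eq_zero_iff.mp (Nat.le_zero.mp hlen)]
      simp [pairN]
    | succ n ih =>
      intro idxs hlen acc i
      match idxs with
      | [] => simp [pairN]
      | [a] => simp [pairN]
      | a :: b :: rest =>
        simp only [pairN, List.nil_append]
        rw [ih rest (by simp at hlen; omega),
            ih rest (by simp at hlen; omega) [List.take (a - i) (List.drop i s), List.take (b + 1 - a) (List.drop a s)]]
        simp
  exact key idxs.length idxs le_rfl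

lemma pairBody_eval (s : List Char) (idxs : List Nat) (acc : List (List Char)) (i0 k : Nat) :
    pairBody s (idxs.map (fun (j : Nat) => (j : Int))) (acc, (i0 : Int)) (k : Int) =
      (acc ++ [(s.drop i0).take (idxs.getD (2 * k) 0 - i0),
               (s.drop (idxs.getD (2 * k) 0)).take (idxs.getD (2 * k + 1) 0 + 1 - idxs.getD (2 * k) 0)],
       ((idxs.getD (2 * k + 1) 0 + 1 : Nat) : Int)) := by
  have c1 : ((k : Int) * 2) = ((2 * k : Nat) : Int) := by push_cast; ring
  have c2 : ((k : Int) * 2 + 1) = ((2 * k + 1 : Nat) : Int) := by push_cast; ring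
  have g1 : PySem.List.pyGetD (idxs.map (fun (j : Nat) => (j : Int))) ((2 * k : Nat) : Int) 0
      = ((idxs.getD (2 * k) 0 : Nat) : Int) := by
    rw [PySem.List.pyGetD_natCast]
    have := List.getD_map (l := idxs) (d := 0) (n := 2 * k) (fun (j : Nat) => (j : Int))
    simpa only [Nat.cast_zero] using this
  have g2 : PySem.List.pyGetD (idxs.map (fun (j : Nat) => (j : Int))) ((2 * k + 1 : Nat) : Int) 0
      = ((idxs.getD (2 * k + 1) 0 : Nat) : Int) := by
    rw [PySem.List.pyGetD_natCast]
    have := List.getD_map (l := idxs) (d := 0) (n := 2 * k + 1) (fun (j : Nat) => (j : Int))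
    simpa only [Nat.cast_zero] using this
  have c3 : ((idxs.getD (2 * k + 1) 0 : Nat) : Int) + 1 = ((idxs.getD (2 * k + 1) 0 + 1 : Nat) : Int) := by
    push_cast; ring
  simp only [pairBody]
  rw [c2, c1, g1, g2, c3, PySem.List.slice_natCast, PySem.List.slice_natCast]

lemma pair_fold_nat (s : List Char) : ∀ (idxs : List Nat) (acc : List (List Char)) (i0 : Nat),
    List.foldl (fun st (k : Nat) => pairBody s (idxs.map (fun (j : Nat) => (j : Int))) st (k : Int))
      (acc, (i0 : Int)) (List.range (idxs.length / 2))
    = ((pairN s idxs acc i0).1, ((pairN s idxs acc i0).2 : Int)) := by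
  intro idxs
  have key : ∀ (n : Nat) (idxs : List Nat), idxs.length ≤ n → ∀ acc (i0 : Nat),
      List.foldl (fun st (k : Nat) => pairBody s (idxs.map (fun (j : Nat) => (j : Int))) st (k : Int))
        (acc, (i0 : Int)) (List.range (idxs.length / 2))
      = ((pairN s idxs acc i0).1, ((pairN s idxs acc i0).2 : Int)) := by
    intro n
    induction n with
    | zero =>
      intro idxs hlen acc i0
      rw [List.length_eq_zero_iff.mp (Nat.le_zero.mp hlen)]
      simp [pairN]
    | succ n ih =>
      intro idxs hlen acc i0
      match idxs with
      | [] => simp [pairN]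
      | [a] => simp [pairN]
      | a :: b :: rest =>
        have hl : (a :: b :: rest).length / 2 = rest.length / 2 + 1 := by
          simp only [List.length_cons]; omega
        rw [hl, List.range_succ_eq_map, List.foldl_cons, List.foldl_map]
        rw [pairBody_eval s (a :: b :: rest) acc i0 0]
        have d0 : (a :: b :: rest).getD (2 * 0) 0 = a := rfl
        have d1 : (a :: b :: rest).getD (2 * 0 + 1) 0 = b := rfl
        rw [d0, d1]
        have hbody : (fun (st : List (List Char) × Int) (k : Nat) =>
            pairBody s ((a :: b :: rest).map (fun (j : Nat) => (j : Int))) st ((k.succ : Nat) : Int))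
            = (fun st (k : Nat) => pairBody s (rest.map (fun (j : Nat) => (j : Int))) st (k : Int)) := by
          funext st k
          have e1 : PySem.List.pyGetD ((a :: b :: rest).map (fun (j : Nat) => (j : Int))) (((k.succ : Nat) : Int) * 2) 0
              = PySem.List.pyGetD (rest.map (fun (j : Nat) => (j : Int))) ((k : Int) * 2) 0 := by
            have cL : (((k.succ : Nat) : Int) * 2) = ((2 * k + 2 : Nat) : Int) := by push_cast; ring
            have cR : ((k : Int) * 2) = ((2 * k : Nat) : Int) := by push_cast; ring
            rw [cL, cR, PySem.List.pyGetD_natCast, PySem.List.pyGetD_natCast]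
            rfl
          have e2 : PySem.List.pyGetD ((a :: b :: rest).map (fun (j : Nat) => (j : Int))) (((k.succ : Nat) : Int) * 2 + 1) 0
              = PySem.List.pyGetD (rest.map (fun (j : Nat) => (j : Int))) ((k : Int) * 2 + 1) 0 := by
            have cL : (((k.succ : Nat) : Int) * 2 + 1) = ((2 * k + 3 : Nat) : Int) := by push_cast; ring
            have cR : ((k : Int) * 2 + 1) = ((2 * k + 1 : Nat) : Int) := by push_cast; ring
            rw [cL, cR, PySem.List.pyGetD_natCast, PySem.List.pyGetD_natCast]
            rfl
          simp only [pairBody, e1, e2]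
        rw [hbody, ih rest (by simp at hlen; omega)]
        simp only [pairN]
  exact key idxs.length idxs le_rfl

lemma pairN_shift : ∀ (idxs : List Nat) (front r2 : List Char) (acc : List (List Char)) (i0 : Nat),
    pairN (front ++ r2) (idxs.map (· + front.length)) acc (i0 + front.length)
    = ((pairN r2 idxs acc i0).1, (pairN r2 idxs acc i0).2 + front.length) := by
  intro idxs
  have key : ∀ (n : Nat) (idxs : List Nat), idxs.length ≤ n →
      ∀ (front r2 : List Char) (acc : List (List Char)) (i0 : Nat),
      pairN (front ++ r2) (idxs.map (· + front.length)) acc (i0 + front.length)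
      = ((pairN r2 idxs acc i0).1, (pairN r2 idxs acc i0).2 + front.length) := by
    intro n
    induction n with
    | zero =>
      intro idxs hlen front r2 acc i0
      rw [List.length_eq_zero_iff.mp (Nat.le_zero.mp hlen)]
      simp [pairN]
    | succ n ih =>
      intro idxs hlen front r2 acc i0
      match idxs with
      | [] => simp [pairN]
      | [a] => simp [pairN]
      | a :: b :: rest =>
        simp only [List.map_cons, pairN]
        have hd1 : (front ++ r2).drop (i0 + front.length) = r2.drop i0 := by
          rw [Nat.add_comm i0, List.drop_length_add_append]
        have hd2 : (front ++ r2).drop (a + front.length) = r2.drop a := by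
          rw [Nat.add_comm a, List.drop_length_add_append]
        have ht1 : a + front.length - (i0 + front.length) = a - i0 := by omega
        have ht2 : b + front.length + 1 - (a + front.length) = b + 1 - a := by omega
        have ht3 : b + front.length + 1 = (b + 1) + front.length := by omega
        rw [hd1, hd2, ht1, ht2, ht3, ih rest (by simp at hlen; omega)]
  exact key idxs.length idxs le_rfl

lemma slice_nat_neg_one (s : List Char) (j : Nat) :
    PySem.List.slice s (some (j : Int)) (some (-1)) = (s.drop j).dropLast := by
  simp only [PySem.List.slice, PySem.List.clampIdx_natCast, PySem.List.clampIdx_neg_one,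
    List.dropLast_eq_take, List.length_drop]
  by_cases hj : j ≤ s.length
  · rw [Nat.min_eq_left hj]
    congr 1
    omega
  · rw [List.drop_eq_nil_of_le (by omega), List.drop_eq_nil_of_le (by omega)]
    simp

-- a characterisation of A's whole computation (over the char list)
lemma A_eval (text : String) :
    splitMathFromText text =
      ((pairN text.toList (sepNat text.toList 0) [] 0).1 ++
        [(text.toList.drop (pairN text.toList (sepNat text.toList 0) [] 0).2).dropLast]).map
        String.ofList := by
  have hsep : (fun (sep : List Int) (k : Nat) => sepBody text.toList sep ↑k)
      = (fun sep k => if text.toList.getD k ' ' = '$' then sep ++ [((k + 0 : Nat) : Int)] else sep) := by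
    funext sep k
    simp only [sepBody, PySem.List.pyGetD_natCast, Nat.add_zero]
  have hdiv : PySem.Int.floordiv ((((sepNat text.toList 0).map (fun (j : Nat) => (j : Int))).length : Int)) 2
      = (((sepNat text.toList 0).length / 2 : Nat) : Int) := by
    rw [List.length_map]
    exact_mod_cast PySem.Int.floordiv_natCast (sepNat text.toList 0).length 2
  have hpair := pair_fold_nat text.toList (sepNat text.toList 0) [] 0
  rw [Nat.cast_zero] at hpair
  simp only [splitMathFromText, PySem.Str.len_eq, PySem.List.pyRange_zero_natCast, List.foldl_map]
  rw [hsep, sep_fold_gen text.toList 0 [], List.nil_append]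
  rw [hdiv, PySem.List.pyRange_zero_natCast, List.foldl_map, hpair]
  rw [slice_nat_neg_one]

-- altGo concatenation / step lemmas
lemma altGo_acc : ∀ (t : List Char) (sent : List (List Char)) (cur : List Char) (b : Bool),
    altGo sent cur b t = sent ++ altGo [] cur b t := by
  intro t
  induction t with
  | nil => intro sent cur b; simp [altGo]
  | cons c cs ih =>
    intro sent cur b
    by_cases hc : c = '$'
    · subst hc
      cases b
      · rw [show altGo sent cur false ('$' :: cs) = altGo (sent ++ [cur]) ['$'] true cs from rfl,
            show altGo [] cur false ('$' :: cs) = altGo ([] ++ [cur]) ['$'] true cs from rfl]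
        rw [ih (sent ++ [cur]) ['$'] true, ih ([] ++ [cur]) ['$'] true]
        simp
      · rw [show altGo sent cur true ('$' :: cs) = altGo (sent ++ [cur ++ ['$']]) [] false cs from rfl,
            show altGo [] cur true ('$' :: cs) = altGo ([] ++ [cur ++ ['$']]) [] false cs from rfl]
        rw [ih (sent ++ [cur ++ ['$']]) [] false, ih ([] ++ [cur ++ ['$']]) [] false]
        simp
    · simp only [altGo, if_neg hc]
      exact ih sent (cur ++ [c]) b

lemma altGo_text_nodollar : ∀ (t : List Char), '$' ∉ t → ∀ sent cur,
    altGo sent cur false t = sent ++ [(cur ++ t).dropLast] := by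
  intro t
  induction t with
  | nil => intro _ sent cur; simp [altGo]
  | cons c cs ih =>
    intro h sent cur
    simp only [List.mem_cons, not_or] at h
    have hc : c ≠ '$' := fun hc => h.1 hc.symm
    simp only [altGo, if_neg hc]
    rw [ih h.2 sent (cur ++ [c])]
    simp

lemma altGo_text_step : ∀ (pre : List Char), '$' ∉ pre → ∀ rest sent cur,
    altGo sent cur false (pre ++ '$' :: rest) = altGo (sent ++ [cur ++ pre]) ['$'] true rest := by
  intro pre
  induction pre with
  | nil => intro _ rest sent cur; simp [altGo]
  | cons c cs ih =>
    intro h rest sent cur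
    simp only [List.mem_cons, not_or] at h
    have hc : c ≠ '$' := fun hc => h.1 hc.symm
    simp only [List.cons_append, altGo, if_neg hc]
    rw [ih h.2 rest sent (cur ++ [c])]
    simp

lemma altGo_math_step : ∀ (mid : List Char), '$' ∉ mid → ∀ r2 sent cur,
    altGo sent cur true (mid ++ '$' :: r2) = altGo (sent ++ [cur ++ mid ++ ['$']]) [] false r2 := by
  intro mid
  induction mid with
  | nil => intro _ r2 sent cur; simp [altGo]
  | cons c cs ih =>
    intro h r2 sent cur
    simp only [List.mem_cons, not_or] at h
    have hc : c ≠ '$' := fun hc => h.1 hc.symm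
    simp only [List.cons_append, altGo, if_neg hc]
    rw [ih h.2 r2 sent (cur ++ [c])]
    simp

-- decomposition of a list containing '$' at its first '$'
lemma dollar_decomp (s : List Char) (h : '$' ∈ s) :
    s = s.takeWhile (· != '$') ++ '$' :: (s.dropWhile (· != '$')).tail ∧
      '$' ∉ s.takeWhile (· != '$') := by
  constructor
  · have hne : s.dropWhile (· != '$') ≠ [] := by
      intro hnil
      have := List.dropWhile_eq_nil_iff.mp hnil _ h
      simp at this
    obtain ⟨d, tl, hd⟩ := List.exists_cons_of_ne_nil hne
    have hdd : d = '$' := by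
      have := List.head_dropWhile_not (p := (· != '$')) (l := s) hne
      simp only [hd, List.head_cons] at this
      simpa using this
    conv_lhs => rw [← List.takeWhile_append_dropWhile (p := (· != '$')) (l := s)]
    rw [hd, hdd]
    simp
  · intro hmem
    have := List.mem_takeWhile_imp hmem
    simp at this

-- the main bridge: A's pair/slice construction equals B's state machine
lemma main_bridge : ∀ (N : Nat) (s : List Char), s.length ≤ N → s.count '$' % 2 = 0 →
    (pairN s (sepNat s 0) [] 0).1 ++ [(s.drop (pairN s (sepNat s 0) [] 0).2).dropLast]
      = altGo [] [] false s := by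
  intro N
  induction N with
  | zero =>
    intro s hlen _
    rw [List.length_eq_zero_iff.mp (Nat.le_zero.mp hlen)]
    simp [sepNat, pairN, altGo]
  | succ N ih =>
    intro s hlen heven
    by_cases hmem : '$' ∈ s
    · obtain ⟨hdec, hpre⟩ := dollar_decomp s hmem
      set pre := s.takeWhile (· != '$') with hpre_def
      set r := (s.dropWhile (· != '$')).tail with hr_def
      have hcount : r.count '$' % 2 = 1 := by
        have hc : s.count '$' = r.count '$' + 1 := by
          conv_lhs => rw [hdec]
          rw [List.count_append, List.count_cons, List.count_eq_zero.mpr hpre]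
          simp
        omega
      have hmem2 : '$' ∈ r := List.count_pos_iff.mp (by omega)
      obtain ⟨hdec2, hmid⟩ := dollar_decomp r hmem2
      generalize hC : r.takeWhile (· != '$') = mid at hdec2 hmid
      generalize hD : (r.dropWhile (· != '$')).tail = r2 at hdec2
      have hcount2 : r2.count '$' % 2 = 0 := by
        have hc : r.count '$' = r2.count '$' + 1 := by
          conv_lhs => rw [hdec2]
          rw [List.count_append, List.count_cons, List.count_eq_zero.mpr hmid]
          simp
        omega
      have hlen2 : r2.length ≤ N := by
        have e1 := congrArg List.length hdec
        have e2 := congrArg List.length hdec2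
        simp only [List.length_append, List.length_cons] at e1 e2
        omega
      have hfront : s = (pre ++ '$' :: (mid ++ ['$'])) ++ r2 := by
        rw [hdec, hdec2]
        simp
      have hflen : (pre ++ '$' :: (mid ++ ['$'])).length = pre.length + mid.length + 2 := by
        simp
        omega
      have hsep : sepNat s 0 = pre.length :: (pre.length + mid.length + 1) ::
          (sepNat r2 0).map (· + (pre ++ '$' :: (mid ++ ['$'])).length) := by
        have u1 : ∀ (t : List Char) (off : Nat), sepNat ('$' :: t) off = off :: sepNat t (off + 1) := by
          intro t off
          simp [sepNat]
        rw [hdec, hdec2, sepNat_append pre _ hpre 0, u1, sepNat_append mid _ hmid, u1]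
        have csh : sepNat r2 (0 + pre.length + 1 + mid.length + 1)
            = (sepNat r2 0).map (· + (pre ++ '$' :: (mid ++ ['$'])).length) := by
          rw [hflen]
          have o3 : 0 + pre.length + 1 + mid.length + 1 = 0 + (pre.length + mid.length + 2) := by omega
          rw [o3, sepNat_shift r2 0 (pre.length + mid.length + 2)]
        rw [csh]
        have o1 : 0 + pre.length = pre.length := by omega
        rw [o1]
        have o2 : pre.length + 1 + mid.length = pre.length + mid.length + 1 := by omega
        rw [o2]
      rw [hsep]
      simp only [pairN]
      have hX1 : List.take (pre.length - 0) (List.drop 0 s) = pre := by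
        rw [Nat.sub_zero, List.drop_zero]
        conv_lhs => rw [hdec]
        exact List.take_left
      have hX2 : List.take (pre.length + mid.length + 1 + 1 - pre.length) (List.drop pre.length s)
          = '$' :: (mid ++ ['$']) := by
        have hdrop : List.drop pre.length s = '$' :: (mid ++ '$' :: r2) := by
          conv_lhs => rw [hdec, hdec2]
          exact List.drop_left
        rw [hdrop]
        have o4 : pre.length + mid.length + 1 + 1 - pre.length = (mid.length + 1) + 1 := by omega
        rw [o4, List.take_succ_cons]
        congr 1
        rw [List.take_append, List.take_of_length_le (by omega)]
        have o5 : mid.length + 1 - mid.length = 1 := by omega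
        rw [o5]
        simp
      rw [hX1, hX2]
      have o6 : pre.length + mid.length + 1 + 1 = 0 + (pre ++ '$' :: (mid ++ ['$'])).length := by
        rw [hflen]; omega
      rw [o6]
      conv_lhs => rw [hfront]
      simp only [List.nil_append]
      rw [pairN_shift (sepNat r2 0) (pre ++ '$' :: (mid ++ ['$'])) r2
            [pre, '$' :: (mid ++ ['$'])] 0]
      rw [pairN_acc r2 (sepNat r2 0) [pre, '$' :: (mid ++ ['$'])] 0]
      rw [Nat.add_comm (pairN r2 (sepNat r2 0) [] 0).2, List.drop_length_add_append]
      have hrhs : altGo [] [] false s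
          = [pre, '$' :: (mid ++ ['$'])] ++ altGo [] [] false r2 := by
        conv_lhs => rw [hdec, hdec2]
        rw [altGo_text_step pre hpre, altGo_math_step mid hmid, altGo_acc]
        simp
      rw [hrhs, ← ih r2 hlen2 hcount2]
      simp
    · rw [sepNat_of_nodollar s hmem 0]
      simp only [pairN]
      rw [altGo_text_nodollar s hmem [] []]
      simp

-- ===== VERDICT (by name: the statement is the Claim_ definition above) =====
theorem splitMathFromText_spec : Claim_equal_splitMathFromText := by
  intro text _ hpre
  unfold Spec_splitMathFromText splitMathFromText_alt
  rw [A_eval]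
  have := main_bridge text.toList.length text.toList le_rfl hpre
  rw [this]
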